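-- pv_equiv track=rewrite | github.com/benjaminazz1210/customer-knowledge-base | backend/app/scripts/reindex.py | _select_source_rows
-- ===== SOURCE A (Python) =====
-- from typing import Any, Dict, List, Optional, Tuple
--
-- def _payload(row: Dict[str, Any]) -> Dict[str, Any]:
--     return dict((row or {}).get("payload", {}) or {})
--
-- def _select_source_rows(file_rows: List[Dict[str, Any]]) -> List[Dict[str, Any]]:
--     parent_rows = [row for row in file_rows if _payload(row).get("chunk_role") == "parent"]
--     if parent_rows:
--         return parent_rows
--
--     non_child_rows = [row for row in file_rows if _payload(row).get("chunk_role") != "child"]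
--     if non_child_rows:
--         return non_child_rows
--     return file_rows
-- ===== SOURCE B (Python) =====
-- from typing import Any, Dict, List
--
-- def _payload(row: Dict[str, Any]) -> Dict[str, Any]:
--     return dict((row or {}).get("payload", {}) or {})
--
-- def _rank(row: Dict[str, Any]) -> int:
--     role = _payload(row).get("chunk_role")
--     if role == "parent":
--         return 0
--     if role == "child":
--         return 2
--     return 1
--
-- def _select_source_rows(file_rows: List[Dict[str, Any]]) -> List[Dict[str, Any]]:
--     ranks = [_rank(row) for row in file_rows]
--     best = min(ranks, default=2)
--     if best == 2:
--         return file_rows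
--     return [row for row, r in zip(file_rows, ranks) if r == best]
-- ===== Notes on version B (the rewrite author's own statement) =====
-- stated objective: alternative
-- what changed: A cascades two separate filter passes with an early-return priority fallback; B assigns each row a numeric priority rank (parent=0, other=1, child=2), computes the minimum rank, and returns the rows achieving that minimum (or file_rows itself when the minimum is 2).
import Mathlib
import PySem

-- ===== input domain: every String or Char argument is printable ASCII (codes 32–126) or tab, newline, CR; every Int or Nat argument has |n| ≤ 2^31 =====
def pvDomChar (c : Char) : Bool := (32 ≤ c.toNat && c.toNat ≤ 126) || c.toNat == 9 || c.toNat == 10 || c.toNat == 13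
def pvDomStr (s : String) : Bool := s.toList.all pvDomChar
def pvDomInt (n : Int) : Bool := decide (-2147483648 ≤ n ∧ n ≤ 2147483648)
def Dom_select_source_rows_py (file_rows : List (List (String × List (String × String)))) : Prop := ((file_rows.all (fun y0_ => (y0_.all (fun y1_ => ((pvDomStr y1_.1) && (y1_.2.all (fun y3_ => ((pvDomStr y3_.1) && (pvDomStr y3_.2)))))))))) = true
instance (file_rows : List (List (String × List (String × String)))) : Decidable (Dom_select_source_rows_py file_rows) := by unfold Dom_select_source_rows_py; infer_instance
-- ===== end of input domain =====

-- B replaces A's cascade of two filter passes by a numeric priority rank per row (parent=0, other=1, child=2),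
-- a min over the ranks, and a single select of the rows achieving that minimum; alternative structure, same values.

-- ===== PORT A =====
-- shared module helper: _payload(row).get("chunk_role")  (dict lookup = first match on the association list)
def pvRole (row : List (String × List (String × String))) : Option String :=
  (PySem.Dict.mk ((PySem.Dict.mk row).getD "payload" [])).get? "chunk_role"

def select_source_rows_py (file_rows : List (List (String × List (String × String)))) : List (List (String × List (String × String))) :=
  let parent_rows := file_rows.filter (fun row => pvRole row == some "parent")
  if parent_rows ≠ [] then parent_rows
  else
    let non_child_rows := file_rows.filter (fun row => !(pvRole row == some "child"))
    if non_child_rows ≠ [] then non_child_rows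
    else file_rows

-- ===== PORT B =====
-- B's helper _rank
def pvRank (row : List (String × List (String × String))) : Nat :=
  let role := pvRole row
  if role == some "parent" then 0
  else if role == some "child" then 2
  else 1

def select_source_rows_py_alt (file_rows : List (List (String × List (String × String)))) : List (List (String × List (String × String))) :=
  let ranks := file_rows.map pvRank
  -- min(ranks, default=2)
  let best := match ranks with
    | [] => 2
    | h :: t => t.foldl min h
  if best == 2 then file_rows
  else ((file_rows.zip ranks).filter (fun p => p.2 == best)).map Prod.fst

-- ===== PRECONDITION & SPEC =====
def Spec_select_source_rows_py (file_rows : List (List (String × List (String × String)))) (out : List (List (String × List (String × String)))) : Prop := out = select_source_rows_py_alt file_rows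
instance (file_rows : List (List (String × List (String × String)))) (out : List (List (String × List (String × String)))) : Decidable (Spec_select_source_rows_py file_rows out) := by unfold Spec_select_source_rows_py; infer_instance

-- ===== CLAIM (what is proved, stated in full; the proofs are below) =====
def Claim_equal_select_source_rows_py : Prop := ∀ (file_rows : List (List (String × List (String × String)))), Dom_select_source_rows_py file_rows → Spec_select_source_rows_py file_rows (select_source_rows_py file_rows)

-- ===== LEMMAS AND PROOFS =====

lemma pv_foldl_min_le_init (l : List Nat) (a : Nat) : l.foldl min a ≤ a := by
  induction l generalizing a with
  | nil => simp
  | cons h t ih => exact le_trans (ih (min a h)) (min_le_left _ _)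

lemma pv_foldl_min_le_mem (l : List Nat) (a x : Nat) (hx : x ∈ l) : l.foldl min a ≤ x := by
  induction l generalizing a with
  | nil => cases hx
  | cons h t ih =>
    rcases List.mem_cons.mp hx with rfl | hx
    · exact le_trans (pv_foldl_min_le_init t (min a x)) (min_le_right a x)
    · exact ih _ hx

lemma pv_le_foldl_min (l : List Nat) (a b : Nat) (ha : b ≤ a) (h : ∀ x ∈ l, b ≤ x) :
    b ≤ l.foldl min a := by
  induction l generalizing a with
  | nil => simpa using ha
  | cons x t ih =>
    exact ih _ (le_min ha (h x (List.mem_cons_self))) (fun y hy => h y (List.mem_cons_of_mem _ hy))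

lemma pv_zip_rank_filter (l : List (List (String × List (String × String)))) (b : Nat) :
    ((l.zip (l.map pvRank)).filter (fun p => p.2 == b)).map Prod.fst
      = l.filter (fun r => pvRank r == b) := by
  induction l with
  | nil => simp
  | cons a t ih =>
    simp only [List.map_cons, List.zip_cons_cons, List.filter_cons]
    by_cases h : pvRank a = b
    · simp [h, ih]
    · simp [ih, show (pvRank a == b) = false by simpa using h]

lemma pv_rank_le_two (r : List (String × List (String × String))) : pvRank r ≤ 2 := by
  unfold pvRank; dsimp only; split_ifs <;> omega

lemma pv_rank_eq_zero_iff (r : List (String × List (String × String))) :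
    (pvRank r == 0) = (pvRole r == some "parent") := by
  unfold pvRank; dsimp only; split_ifs with h1 h2 <;> simp_all

-- the priority minimum of file_rows, as B computes it
def pvBest (l : List (List (String × List (String × String)))) : Nat :=
  match l.map pvRank with
  | [] => 2
  | h :: t => t.foldl min h

lemma pv_best_le (l : List (List (String × List (String × String)))) (r : List (String × List (String × String))) (hr : r ∈ l) :
    pvBest l ≤ pvRank r := by
  unfold pvBest
  cases l with
  | nil => cases hr
  | cons x t =>
    simp only [List.map_cons]
    rcases List.mem_cons.mp hr with rfl | hr
    · exact pv_foldl_min_le_init _ _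
    · exact pv_foldl_min_le_mem _ _ _ (List.mem_map_of_mem hr)

lemma pv_le_best (l : List (List (String × List (String × String)))) (b : Nat)
    (h : ∀ r ∈ l, b ≤ pvRank r) : l ≠ [] → b ≤ pvBest l := by
  intro hne
  unfold pvBest
  cases l with
  | nil => exact absurd rfl hne
  | cons x t =>
    simp only [List.map_cons]
    exact pv_le_foldl_min _ _ _ (h x (List.mem_cons_self)) (fun y hy => by
      obtain ⟨r, hr, rfl⟩ := List.mem_map.mp hy
      exact h r (List.mem_cons_of_mem _ hr))

lemma pv_alt_eq (l : List (List (String × List (String × String)))) :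
    select_source_rows_py_alt l =
      if pvBest l == 2 then l else l.filter (fun r => pvRank r == pvBest l) := by
  unfold select_source_rows_py_alt pvBest
  cases h : l.map pvRank with
  | nil => simp
  | cons a t => rw [← pv_zip_rank_filter l]; simp [h]

-- ===== VERDICT (by name: the statement is the Claim_ definition above) =====
theorem select_source_rows_py_spec : Claim_equal_select_source_rows_py := by
  intro fr _
  show select_source_rows_py fr = select_source_rows_py_alt fr
  rw [pv_alt_eq]
  unfold select_source_rows_py
  by_cases hp : fr.filter (fun row => pvRole row == some "parent") = []
  · simp only [hp, ne_eq, not_true_eq_false, if_false]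
    have hnp : ∀ r ∈ fr, ¬(pvRole r == some "parent") = true := by
      intro r hr; exact fun hc => (List.filter_eq_nil_iff.mp hp r hr) hc
    have hrank1 : ∀ r ∈ fr, 1 ≤ pvRank r := by
      intro r hr
      unfold pvRank; dsimp only
      split_ifs with h1 h2
      · exact absurd h1 (hnp r hr)
      · omega
      · omega
    by_cases hc : fr.filter (fun row => !(pvRole row == some "child")) = []
    · -- every row is a child: best = 2, both return fr
      have hall : ∀ r ∈ fr, pvRank r = 2 := by
        intro r hr
        have hch : ¬(!(pvRole r == some "child")) = true :=
          fun h => (List.filter_eq_nil_iff.mp hc r hr) h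
        have : (pvRole r == some "child") = true := by
          by_contra h; exact hch (by simp [h])
        unfold pvRank; dsimp only
        rw [if_neg (fun h1 => hnp r hr h1), if_pos this]
      by_cases hfr : fr = []
      · subst hfr; simp [pvBest]
      · have h2 : 2 ≤ pvBest fr := pv_le_best fr 2 (fun r hr => le_of_eq (hall r hr).symm) hfr
        have h2' : pvBest fr ≤ 2 := by
          rcases List.exists_mem_of_ne_nil fr hfr with ⟨r, hr⟩
          exact le_trans (pv_best_le fr r hr) (pv_rank_le_two r)
        simp [hc, le_antisymm h2' h2]
    · -- some non-child, no parent: best = 1, both return the non-child rows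
      rcases List.exists_mem_of_ne_nil _ hc with ⟨r, hr⟩
      have hr' := List.mem_filter.mp hr
      have hrfr := hr'.1
      have hnc : (pvRole r == some "child") = false := by
        have := hr'.2; simpa using this
      have hrank : pvRank r = 1 := by
        unfold pvRank; dsimp only
        rw [if_neg (fun h1 => hnp r hrfr h1), if_neg (by simp [hnc])]
      have hne : fr ≠ [] := by rintro rfl; cases hrfr
      have h1 : 1 ≤ pvBest fr := pv_le_best fr 1 hrank1 hne
      have h1' : pvBest fr ≤ 1 := hrank ▸ pv_best_le fr r hrfr
      have hbest : pvBest fr = 1 := le_antisymm h1' h1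
      have hfe : fr.filter (fun x => pvRank x == 1)
          = fr.filter (fun row => !(pvRole row == some "child")) := by
        apply List.filter_congr
        intro x hx
        unfold pvRank; dsimp only
        rw [if_neg (fun h1 => hnp x hx h1)]
        by_cases hcx : (pvRole x == some "child") = true <;> simp [hcx]
      simp [hbest, hc, hfe]
  · -- a parent exists: best = 0, both return the parent rows
    rcases List.exists_mem_of_ne_nil _ hp with ⟨r, hr⟩
    have hr' := List.mem_filter.mp hr
    have hrank : pvRank r = 0 := by
      have := pv_rank_eq_zero_iff r
      rw [hr'.2] at this
      simpa using this
    have hbest : pvBest fr = 0 :=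
      Nat.le_zero.mp (hrank ▸ pv_best_le fr r hr'.1)
    have hfe : fr.filter (fun x => pvRank x == 0)
        = fr.filter (fun row => pvRole row == some "parent") := by
      apply List.filter_congr
      intro x _
      rw [pv_rank_eq_zero_iff]
    simp [hp, hbest, hfe]
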